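-- pv_equiv track=rewrite | github.com/aerosim-open/aerosim | examples/utils/aerosim_utils/visualization.py | group_by_track
-- ===== SOURCE A (Python) =====
-- def group_by_track(unified_records):
--     groups = {}
--     for rec in unified_records:
--         tid = rec['track_id']
--         groups.setdefault(tid, []).append(rec)
--     for tid in groups:
--         groups[tid] = sorted(groups[tid], key=lambda x: x['timestamp'])
--     return groups
-- ===== SOURCE B (Python) =====
-- def group_by_track(unified_records):
--     # Register group keys in first-appearance order, then fill groups in one
--     # pass over a single globally timestamp-sorted copy (stable sort ensures
--     # each group comes out in the same order as per-group sorting would give).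
--     groups = {}
--     for rec in unified_records:
--         groups.setdefault(rec['track_id'], [])
--     for rec in sorted(unified_records, key=lambda x: x['timestamp']):
--         groups[rec['track_id']].append(rec)
--     return groups
-- ===== Notes on version B (the rewrite author's own statement) =====
-- stated objective: alternative
-- what changed: B replaces A's group-then-sort-each-group shape by one global stable sort by timestamp followed by a single grouping pass (group keys pre-registered in first-appearance order); equivalence rests on sort stability.
import Mathlib
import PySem

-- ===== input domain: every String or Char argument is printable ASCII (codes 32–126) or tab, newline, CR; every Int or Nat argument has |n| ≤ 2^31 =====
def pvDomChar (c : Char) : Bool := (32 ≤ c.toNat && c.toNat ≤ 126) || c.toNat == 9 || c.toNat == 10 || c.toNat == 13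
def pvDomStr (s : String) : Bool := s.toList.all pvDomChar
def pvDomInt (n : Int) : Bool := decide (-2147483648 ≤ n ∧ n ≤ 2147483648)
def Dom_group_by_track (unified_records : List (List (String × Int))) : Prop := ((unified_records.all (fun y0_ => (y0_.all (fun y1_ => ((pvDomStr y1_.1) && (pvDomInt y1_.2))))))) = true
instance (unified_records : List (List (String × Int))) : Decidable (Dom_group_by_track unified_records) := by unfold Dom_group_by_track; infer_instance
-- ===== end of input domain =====

-- B groups after one global stable sort by timestamp instead of sorting each group; equivalence is the stability of Python's sort.

-- field access rec[k] (a record is an assoc list = Python dict); Pre_ guarantees the key is present, so getD's default is never used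
def pvField (rec : List (String × Int)) (k : String) : Int := (PySem.Dict.mk rec).getD k 0

-- ===== PORT A =====
def group_by_track (unified_records : List (List (String × Int))) : List (Int × List (List (String × Int))) :=
  let groups := unified_records.foldl
    (fun d rec => d.modify (pvField rec "track_id") [] (fun l => l ++ [rec]))
    PySem.Dict.empty
  let groups2 := groups.keys.foldl
    (fun d tid => d.insert tid (PySem.List.sorted (d.getD tid []) (fun x => pvField x "timestamp")))
    groups
  groups2.items

-- ===== PORT B =====
def group_by_track_alt (unified_records : List (List (String × Int))) : List (Int × List (List (String × Int))) :=
  let groups := unified_records.foldl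
    (fun d rec => d.setdefault (pvField rec "track_id") [])
    (PySem.Dict.empty : PySem.Dict Int (List (List (String × Int))))
  let groups2 := (PySem.List.sorted unified_records (fun x => pvField x "timestamp")).foldl
    (fun d rec => d.modify (pvField rec "track_id") [] (fun l => l ++ [rec]))
    groups
  groups2.items

-- ===== PRECONDITION & SPEC =====
-- Pre_ excludes records missing the 'track_id' or 'timestamp' key, on which Python A raises KeyError (and B too).
def Pre_group_by_track (unified_records : List (List (String × Int))) : Prop :=
  ∀ rec ∈ unified_records,
    (PySem.Dict.mk rec).contains "track_id" = true ∧ (PySem.Dict.mk rec).contains "timestamp" = true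
instance (unified_records : List (List (String × Int))) : Decidable (Pre_group_by_track unified_records) := by unfold Pre_group_by_track; infer_instance

def pvWitness_group_by_track : (List (List (String × Int))) := [[("track_id", 1), ("timestamp", 2)], [("track_id", 1), ("timestamp", 0)]]

def Spec_group_by_track (unified_records : List (List (String × Int))) (out : List (Int × List (List (String × Int)))) : Prop := out = group_by_track_alt unified_records
instance (unified_records : List (List (String × Int))) (out : List (Int × List (List (String × Int)))) : Decidable (Spec_group_by_track unified_records out) := by unfold Spec_group_by_track; infer_instance

-- ===== CLAIM (what is proved, stated in full; the proofs are below) =====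
def Claim_equal_group_by_track : Prop := ∀ (unified_records : List (List (String × Int))), Dom_group_by_track unified_records → Pre_group_by_track unified_records → Spec_group_by_track unified_records (group_by_track unified_records)

-- ===== LEMMAS AND PROOFS =====

-- insertBy puts x in front when it goes before everything
theorem insertBy_front {α : Type} (before : α → α → Bool) (x : α) (zs : List α)
    (h : ∀ z ∈ zs, before x z = true) :
    PySem.List.insertBy before x zs = x :: zs := by
  cases zs with
  | nil => rfl
  | cons z t => rw [PySem.List.insertBy.eq_2, h z (by simp)]; simp

-- filter commutes with a single stable insertion into a key-sorted list
theorem filter_insertBy {α κ : Type} [LinearOrder κ] (key : α → κ) (p : α → Bool) (x : α)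
    (ys : List α) (hs : ys.Pairwise (fun a b => key a ≤ key b)) :
    (PySem.List.insertBy (fun a b => decide (key a < key b)) x ys).filter p
      = if p x then PySem.List.insertBy (fun a b => decide (key a < key b)) x (ys.filter p)
        else ys.filter p := by
  induction ys with
  | nil =>
    simp only [PySem.List.insertBy.eq_1, List.filter_nil]
    split_ifs with hp <;> simp [List.filter, hp]
  | cons y ys ih =>
    have hy : ∀ b ∈ ys, key y ≤ key b := (List.pairwise_cons.mp hs).1
    have hys : ys.Pairwise (fun a b => key a ≤ key b) := (List.pairwise_cons.mp hs).2
    rw [PySem.List.insertBy.eq_2]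
    by_cases hxy : key x < key y
    · simp only [hxy, decide_true, if_true]
      by_cases hp : p x
      · have hfront : PySem.List.insertBy (fun a b => decide (key a < key b)) x ((y :: ys).filter p) = x :: (y :: ys).filter p := by
          apply insertBy_front
          intro z hz
          have hz' : z ∈ y :: ys := List.mem_of_mem_filter hz
          have : key y ≤ key z := by
            rcases List.mem_cons.mp hz' with h | h
            · exact le_of_eq (by rw [h])
            · exact hy z h
          simp [lt_of_lt_of_le hxy this]
        rw [hfront]
        simp [List.filter, hp]
      · simp only [hp]
        simp [List.filter, hp]
    · simp only [hxy, decide_false, Bool.false_eq_true, if_false]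
      rw [List.filter_cons]
      by_cases hpy : p y
      · simp only [hpy, if_true]
        rw [ih hys]
        by_cases hp : p x
        · simp only [hp, if_true, List.filter_cons, hpy, if_true]
          rw [PySem.List.insertBy.eq_2]
          simp [hxy]
        · simp [hp, hpy]
      · simp only [hpy, Bool.false_eq_true, if_false]
        rw [ih hys]
        by_cases hp : p x <;> simp [hp, hpy]

theorem sorted_append_singleton {α κ : Type} [LinearOrder κ] (key : α → κ) (xs : List α) (x : α) :
    PySem.List.sorted (xs ++ [x]) key
      = PySem.List.insertBy (fun a b => decide (key a < key b)) x (PySem.List.sorted xs key) := by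
  rw [PySem.List.sorted_eq_foldl_insertBy, PySem.List.sorted_eq_foldl_insertBy, List.foldl_append]
  rfl

-- filter commutes with the stable sort (stability)
theorem filter_sorted {α κ : Type} [LinearOrder κ] (key : α → κ) (p : α → Bool) (xs : List α) :
    (PySem.List.sorted xs key).filter p = PySem.List.sorted (xs.filter p) key := by
  induction xs using List.reverseRecOn with
  | nil => rfl
  | append_singleton xs x ih =>
    rw [sorted_append_singleton, filter_insertBy key p x _ (PySem.List.sorted_pairwise xs key),
        List.filter_append]
    by_cases hp : p x
    · simp only [hp, if_true, List.filter_cons, List.filter_nil]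
      rw [ih, ← sorted_append_singleton]
    · simp only [hp, Bool.false_eq_true, if_false, List.filter_cons, List.filter_nil]
      simp [ih]

-- value lemma for the grouping fold, keyed form
theorem getD_foldl_modify_key {β : Type} (g : β → Int) (l : List β)
    (d : PySem.Dict Int (List β)) (t : Int) :
    (l.foldl (fun d r => d.modify (g r) [] (fun v => v ++ [r])) d).getD t []
      = d.getD t [] ++ l.filter (fun r => g r == t) := by
  have h := PySem.Dict.getD_foldl_modify_append (l.map (fun r => (g r, r))) d t
  rw [List.foldl_map] at h
  rw [h, List.filter_map, List.map_map]
  simp [Function.comp_def]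

-- the setdefault fold only registers keys, all values stay as before (new ones [])
theorem getD_foldl_setdefault {β : Type} (g : β → Int) (l : List β)
    (d : PySem.Dict Int (List β)) (t : Int) :
    (l.foldl (fun d r => d.setdefault (g r) []) d).getD t [] = d.getD t [] := by
  induction l generalizing d with
  | nil => rfl
  | cons r l ih =>
    rw [List.foldl_cons, ih]
    by_cases hc : d.contains (g r) = true
    · rw [PySem.Dict.setdefault_of_contains d _ hc]
    · rw [PySem.Dict.setdefault_of_not_contains d _ (Bool.not_eq_true _ ▸ hc)]
      by_cases ht : t = g r
      · subst ht
        rw [PySem.Dict.getD_insert_self, PySem.Dict.getD_of_not_contains d [] (Bool.not_eq_true _ ▸ hc)]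
      · rw [PySem.Dict.getD_insert_of_ne d _ _ ht]

theorem keys_foldl_setdefault {β : Type} (g : β → Int) (l : List β)
    (d : PySem.Dict Int (List β)) :
    (l.foldl (fun d r => d.setdefault (g r) []) d).keys = PySem.Set.update d.keys (l.map g) := by
  induction l generalizing d with
  | nil => rfl
  | cons r l ih =>
    have hone : ∀ (s : PySem.Set Int) (x : Int), PySem.Set.update s [x] = PySem.Set.add s x := by
      intro s x; rw [PySem.Set.update_eq_foldl]; rfl
    have hsd : (d.setdefault (g r) []).keys = PySem.Set.add d.keys (g r) := by
      rw [PySem.Dict.keys_setdefault, PySem.Set.add.eq_1]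
      simp [PySem.Set.contains_eq_listContains, PySem.Dict.contains_eq_decide_mem_keys,
        List.contains_eq_mem]
    rw [List.foldl_cons, ih, hsd, List.map_cons,
        show g r :: l.map g = [g r] ++ l.map g from rfl, PySem.Set.update_append, hone]


theorem update_of_subset {α : Type} [BEq α] [LawfulBEq α] (s : PySem.Set α) (l : List α)
    (h : ∀ x ∈ l, x ∈ s) : PySem.Set.update s l = s := by
  induction l generalizing s with
  | nil => rfl
  | cons x l ih =>
    rw [PySem.Set.update_eq_foldl, List.foldl_cons, ← PySem.Set.update_eq_foldl,
        PySem.Set.add_of_mem (h x (by simp))]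
    exact ih s (fun y hy => h y (by simp [hy]))

-- A's second loop: keys unchanged
theorem keys_foldl_insert_sorted (ks : List Int) (d : PySem.Dict Int (List (List (String × Int))))
    (h : ∀ t ∈ ks, d.contains t = true) :
    (ks.foldl (fun d tid => d.insert tid (PySem.List.sorted (d.getD tid []) (fun x => pvField x "timestamp"))) d).keys = d.keys := by
  induction ks generalizing d with
  | nil => rfl
  | cons a ks ih =>
    rw [List.foldl_cons,
        ih _ (fun t' ht' => by rw [PySem.Dict.contains_insert]; simp [h t' (by simp [ht'])]),
        PySem.Dict.keys_insert_of_contains d _ (h a (by simp))]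

-- A's second loop: each key's value gets sorted exactly once
theorem getD_foldl_insert_sorted (ks : List Int) (d : PySem.Dict Int (List (List (String × Int))))
    (hnd : ks.Nodup) (h : ∀ t ∈ ks, d.contains t = true) (t : Int) :
    (ks.foldl (fun d tid => d.insert tid (PySem.List.sorted (d.getD tid []) (fun x => pvField x "timestamp"))) d).getD t []
      = if t ∈ ks then PySem.List.sorted (d.getD t []) (fun x => pvField x "timestamp") else d.getD t [] := by
  induction ks generalizing d with
  | nil => simp
  | cons a ks ih =>
    have ha : a ∉ ks := (List.nodup_cons.mp hnd).1
    rw [List.foldl_cons,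
        ih _ (List.nodup_cons.mp hnd).2
          (fun t' ht' => by rw [PySem.Dict.contains_insert]; simp [h t' (by simp [ht'])])]
    by_cases hks : t ∈ ks
    · have hta : t ≠ a := fun e => ha (e ▸ hks)
      simp only [List.mem_cons, hks, or_true, if_true]
      rw [PySem.Dict.getD_insert_of_ne d _ _ hta]
    · by_cases hta : t = a
      · subst hta
        simp only [hks, if_false, List.mem_cons, true_or, if_true]
        rw [PySem.Dict.getD_insert_self]
      · simp only [hks, if_false, List.mem_cons, hta, false_or, if_false]
        rw [PySem.Dict.getD_insert_of_ne d _ _ hta]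

-- ===== VERDICT (by name: the statement is the Claim_ definition above) =====
theorem group_by_track_spec : Claim_equal_group_by_track := by
  intro urs _ _
  show group_by_track urs = group_by_track_alt urs
  unfold group_by_track group_by_track_alt
  -- A side
  have hg1keys : (urs.foldl (fun d rec => d.modify (pvField rec "track_id") [] (fun l => l ++ [rec])) PySem.Dict.empty).keys
      = PySem.Set.update [] (urs.map (fun r => pvField r "track_id")) := by
    rw [PySem.Dict.keys_foldl_modify_key urs (fun r => pvField r "track_id") []
          (fun _ x => fun l => l ++ [x]) PySem.Dict.empty, PySem.Dict.keys_empty]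
  have hg1nodup : (urs.foldl (fun d rec => d.modify (pvField rec "track_id") [] (fun l => l ++ [rec])) PySem.Dict.empty).keys.Nodup :=
    PySem.Dict.nodup_keys_foldl_modify_key urs (fun r => pvField r "track_id") []
      (fun _ x => fun l => l ++ [x]) PySem.Dict.empty PySem.Dict.nodup_keys_empty
  have hg1getD : ∀ t, (urs.foldl (fun d rec => d.modify (pvField rec "track_id") [] (fun l => l ++ [rec])) PySem.Dict.empty).getD t []
      = urs.filter (fun r => pvField r "track_id" == t) := by
    intro t
    rw [getD_foldl_modify_key (fun r => pvField r "track_id") urs PySem.Dict.empty t,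
        PySem.Dict.getD_empty, List.nil_append]
  have hg1cont : ∀ t ∈ (urs.foldl (fun d rec => d.modify (pvField rec "track_id") [] (fun l => l ++ [rec])) PySem.Dict.empty).keys,
      (urs.foldl (fun d rec => d.modify (pvField rec "track_id") [] (fun l => l ++ [rec])) PySem.Dict.empty).contains t = true :=
    fun t ht => (PySem.Dict.contains_iff_mem_keys _ t).mpr ht
  -- B side, first fold
  have hb0keys : (urs.foldl (fun d rec => d.setdefault (pvField rec "track_id") []) (PySem.Dict.empty : PySem.Dict Int (List (List (String × Int))))).keys
      = PySem.Set.update [] (urs.map (fun r => pvField r "track_id")) := by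
    rw [keys_foldl_setdefault (fun r => pvField r "track_id") urs PySem.Dict.empty, PySem.Dict.keys_empty]
  have hb0getD : ∀ t, (urs.foldl (fun d rec => d.setdefault (pvField rec "track_id") []) (PySem.Dict.empty : PySem.Dict Int (List (List (String × Int))))).getD t [] = [] := by
    intro t
    rw [getD_foldl_setdefault (fun r => pvField r "track_id") urs PySem.Dict.empty t, PySem.Dict.getD_empty]
  -- B side, second fold
  have hB2keys : ((PySem.List.sorted urs (fun x => pvField x "timestamp")).foldl (fun d rec => d.modify (pvField rec "track_id") [] (fun l => l ++ [rec]))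
        (urs.foldl (fun d rec => d.setdefault (pvField rec "track_id") []) (PySem.Dict.empty : PySem.Dict Int (List (List (String × Int)))))).keys
      = PySem.Set.update [] (urs.map (fun r => pvField r "track_id")) := by
    rw [PySem.Dict.keys_foldl_modify_key (PySem.List.sorted urs (fun x => pvField x "timestamp"))
          (fun r => pvField r "track_id") [] (fun _ x => fun l => l ++ [x]) _, hb0keys]
    apply update_of_subset
    intro x hx
    rcases List.mem_map.mp hx with ⟨r, hr, rfl⟩
    have : r ∈ urs := (PySem.List.mem_sorted urs _ false r).mp hr
    exact (PySem.Set.mem_update [] (urs.map (fun r => pvField r "track_id")) _).mpr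
      (Or.inr (List.mem_map.mpr ⟨r, this, rfl⟩))
  have hB2getD : ∀ t, ((PySem.List.sorted urs (fun x => pvField x "timestamp")).foldl (fun d rec => d.modify (pvField rec "track_id") [] (fun l => l ++ [rec]))
        (urs.foldl (fun d rec => d.setdefault (pvField rec "track_id") []) (PySem.Dict.empty : PySem.Dict Int (List (List (String × Int)))))).getD t []
      = PySem.List.sorted (urs.filter (fun r => pvField r "track_id" == t)) (fun x => pvField x "timestamp") := by
    intro t
    rw [getD_foldl_modify_key (fun r => pvField r "track_id") _ _ t, hb0getD, List.nil_append,
        filter_sorted (fun x => pvField x "timestamp") (fun r => pvField r "track_id" == t) urs]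
  -- A side, second fold
  have hA2keys := keys_foldl_insert_sorted _ _ hg1cont
  have hA2getD := getD_foldl_insert_sorted _ _ hg1nodup hg1cont
  -- items
  rw [PySem.Dict.items_eq_map_keys _ (by rw [hA2keys]; exact hg1nodup) ([] : List (List (String × Int))),
      PySem.Dict.items_eq_map_keys _ (by rw [hB2keys, ← hg1keys]; exact hg1nodup) ([] : List (List (String × Int))),
      hA2keys, hB2keys, ← hg1keys]
  apply List.map_congr_left
  intro t ht
  have h1 : _ = _ := hA2getD t
  rw [if_pos ht] at h1
  rw [h1, hB2getD t, hg1getD t]
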